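-- pv_equiv track=rewrite | github.com/HannesEberhard/aoc | 2020/14/script.py | update_mask_part_1
-- ===== SOURCE A (Python) =====
-- def update_mask_part_1(value):
--     and_mask = 0
--     or_mask = 0
--     for v in value:
--         and_mask <<= 1
--         or_mask <<= 1
--         if v != '0':
--             and_mask |= 1
--         if v == '1':
--             or_mask |= 1
--     return and_mask, or_mask
-- ===== SOURCE B (Python) =====
-- def update_mask_part_1(value):
--     if not value:
--         return 0, 0
--     and_str = ''.join('0' if v == '0' else '1' for v in value)
--     or_str = ''.join('1' if v == '1' else '0' for v in value)
--     return int(and_str, 2), int(or_str, 2)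
-- ===== Notes on version B (the rewrite author's own statement) =====
-- stated objective: idiomatic
-- what changed: B replaces A's explicit shift-and-or accumulator loop (n shifts of an ever-growing big integer) by mapping the mask string to two binary-digit strings and parsing them with int in base 2 (a single C-level power-of-two-base parse), handling an empty input directly since int of an empty string raises.
import Mathlib
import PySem

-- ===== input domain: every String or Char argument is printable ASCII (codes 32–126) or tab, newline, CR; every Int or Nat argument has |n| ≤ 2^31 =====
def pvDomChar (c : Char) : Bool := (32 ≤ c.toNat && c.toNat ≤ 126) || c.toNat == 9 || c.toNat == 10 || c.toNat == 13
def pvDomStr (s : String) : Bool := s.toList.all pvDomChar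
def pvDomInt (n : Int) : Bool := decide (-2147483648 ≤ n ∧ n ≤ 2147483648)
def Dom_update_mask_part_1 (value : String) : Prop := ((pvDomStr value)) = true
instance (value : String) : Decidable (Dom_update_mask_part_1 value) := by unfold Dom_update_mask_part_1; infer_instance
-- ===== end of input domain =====

-- B builds two binary-digit strings from the mask and parses them with int(..., 2),
-- instead of A's explicit shift-and-or accumulator loop; objective: idiomatic.


-- ===== PORT A =====
-- one iteration of A's for-loop over the characters of value
def pvStepA (p : Int × Int) (v : Char) : Int × Int :=
  let and_mask := p.1 <<< (1 : ℕ)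
  let or_mask := p.2 <<< (1 : ℕ)
  let and_mask := if v ≠ '0' then Int.lor and_mask 1 else and_mask
  let or_mask := if v = '1' then Int.lor or_mask 1 else or_mask
  (and_mask, or_mask)

def update_mask_part_1 (value : String) : Int × Int :=
  value.toList.foldl pvStepA (0, 0)

-- ===== PORT B =====
-- int(s, 2) ported by hand as a left fold; exact for non-empty strings of '0'/'1'
-- digits, which is all that B ever passes to it
def pvIntOfBin (s : List Char) : Int :=
  s.foldl (fun a c => 2 * a + (if c = '1' then 1 else 0)) 0

def update_mask_part_1_alt (value : String) : Int × Int :=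
  if value = "" then (0, 0)
  else
    (pvIntOfBin (value.toList.map (fun v => if v = '0' then '0' else '1')),
     pvIntOfBin (value.toList.map (fun v => if v = '1' then '1' else '0')))

-- ===== PRECONDITION & SPEC =====
def Spec_update_mask_part_1 (value : String) (out : Int × Int) : Prop := out = update_mask_part_1_alt value
instance (value : String) (out : Int × Int) : Decidable (Spec_update_mask_part_1 value out) := by unfold Spec_update_mask_part_1; infer_instance

-- ===== CLAIM (what is proved, stated in full; the proofs are below) =====
def Claim_equal_update_mask_part_1 : Prop := ∀ (value : String), Dom_update_mask_part_1 value → Spec_update_mask_part_1 value (update_mask_part_1 value)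

-- ===== LEMMAS AND PROOFS =====
theorem pv_shl1 (a : Int) : a <<< (1 : ℕ) = 2 * a := by
  rw [Int.shiftLeft_eq]; ring

theorem pv_nat_lor1 (n : ℕ) : 2 * n ||| 1 = 2 * n + 1 := by
  have h := Nat.lor_bit false n true 0
  simpa [Nat.bit] using h

theorem pv_lor1 (a : Int) (h : 0 ≤ a) : Int.lor (2 * a) 1 = 2 * a + 1 := by
  obtain ⟨n, rfl⟩ := Int.eq_ofNat_of_zero_le h
  have h3 : Int.lor (Int.ofNat (2 * n)) (Int.ofNat 1) = Int.ofNat ((2 * n) ||| 1) := rfl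
  rw [pv_nat_lor1] at h3
  simpa using h3

theorem pvStepA_eq (a o : Int) (ha : 0 ≤ a) (ho : 0 ≤ o) (v : Char) :
    pvStepA (a, o) v =
      (2 * a + (if v = '0' then 0 else 1), 2 * o + (if v = '1' then 1 else 0)) := by
  by_cases h0 : v = '0' <;> by_cases h1 : v = '1' <;>
    simp [pvStepA, pv_shl1, h0, h1, pv_lor1 a ha, pv_lor1 o ho]

theorem pvFold_eq : ∀ (l : List Char) (a o : Int), 0 ≤ a → 0 ≤ o →
    List.foldl pvStepA (a, o) l =
      (List.foldl (fun x v => 2 * x + (if v = '0' then 0 else 1)) a l,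
       List.foldl (fun x v => 2 * x + (if v = '1' then 1 else 0)) o l) := by
  intro l
  induction l with
  | nil => intro a o _ _; simp
  | cons c t ih =>
    intro a o ha ho
    simp only [List.foldl_cons]
    rw [pvStepA_eq a o ha ho c]
    exact ih _ _ (by split_ifs <;> omega) (by split_ifs <;> omega)

theorem pvMapAnd (l : List Char) :
    pvIntOfBin (l.map (fun v => if v = '0' then '0' else '1')) =
      List.foldl (fun x v => 2 * x + (if v = '0' then 0 else 1)) 0 l := by
  unfold pvIntOfBin
  rw [List.foldl_map]
  congr 1
  funext x v
  by_cases h : v = '0' <;> simp [h]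

theorem pvMapOr (l : List Char) :
    pvIntOfBin (l.map (fun v => if v = '1' then '1' else '0')) =
      List.foldl (fun x v => 2 * x + (if v = '1' then 1 else 0)) 0 l := by
  unfold pvIntOfBin
  rw [List.foldl_map]
  congr 1
  funext x v
  by_cases h : v = '1' <;> simp [h]

-- ===== VERDICT (by name: the statement is the Claim_ definition above) =====
theorem update_mask_part_1_spec : Claim_equal_update_mask_part_1 := by
  intro value _
  unfold Spec_update_mask_part_1 update_mask_part_1 update_mask_part_1_alt
  by_cases h : value = ""
  · subst h; decide
  · rw [if_neg h, pvFold_eq value.toList 0 0 le_rfl le_rfl, pvMapAnd, pvMapOr]
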